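-- pv_equiv track=rewrite | github.com/xavierbower/TranslationScope | backend/sequence_screener.py | screen_tags
-- ===== SOURCE A (Python) =====
-- CODON_TABLE = {
--     "UUU": "F", "UUC": "F", "UUA": "L", "UUG": "L",
--     "CUU": "L", "CUC": "L", "CUA": "L", "CUG": "L",
--     "AUU": "I", "AUC": "I", "AUA": "I", "AUG": "M",
--     "GUU": "V", "GUC": "V", "GUA": "V", "GUG": "V",
--     "UCU": "S", "UCC": "S", "UCA": "S", "UCG": "S",
--     "CCU": "P", "CCC": "P", "CCA": "P", "CCG": "P",
--     "ACU": "T", "ACC": "T", "ACA": "T", "ACG": "T",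
--     "GCU": "A", "GCC": "A", "GCA": "A", "GCG": "A",
--     "UAU": "Y", "UAC": "Y", "UAA": "*", "UAG": "*",
--     "CAU": "H", "CAC": "H", "CAA": "Q", "CAG": "Q",
--     "AAU": "N", "AAC": "N", "AAA": "K", "AAG": "K",
--     "GAU": "D", "GAC": "D", "GAA": "E", "GAG": "E",
--     "UGU": "C", "UGC": "C", "UGA": "*", "UGG": "W",
--     "CGU": "R", "CGC": "R", "CGA": "R", "CGG": "R",
--     "AGU": "S", "AGC": "S", "AGA": "R", "AGG": "R",
--     "GGU": "G", "GGC": "G", "GGA": "G", "GGG": "G",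
-- }
--
-- TAG_SIGNATURES = {
--     "6xHis": {"type": "codon_pattern"},
--     "FLAG": {"seq": "DYKDDDDK"},
--     "Strep-tag": {"seq": "WSHPQFEK"},
--     "HA": {"seq": "YPYDVPDYA"},
--     "Myc": {"seq": "EQKLISEEDL"},
--     "MBP": {"prefix": "MKIEEGKLVI"},
--     "GST": {"prefix": "MSPILGYWKI"},
-- }
--
-- def translate_rna(rna: str) -> str:
--     """Translate RNA sequence to amino acid string."""
--     aa = []
--     for i in range(0, len(rna) - 2, 3):
--         codon = rna[i:i + 3]
--         residue = CODON_TABLE.get(codon, "X")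
--         if residue == "*":
--             break
--         aa.append(residue)
--     return "".join(aa)
--
-- def screen_tags(cds_rna: str) -> tuple[bool, str, int]:
--     """Check first 30 codons for known tags."""
--     first_90nt = cds_rna[:90]
--     aa = translate_rna(first_90nt)
--
--     # 6xHis: >= 4 consecutive CAC or CAU codons
--     his_run = 0
--     max_his = 0
--     for i in range(0, min(len(cds_rna), 90) - 2, 3):
--         codon = cds_rna[i:i + 3]
--         if codon in ("CAC", "CAU"):
--             his_run += 1
--             max_his = max(max_his, his_run)
--         else:
--             his_run = 0
--     if max_his >= 4:
--         return True, "6xHis", max_his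
--
--     # Sequence-based tags
--     for tag_name, info in TAG_SIGNATURES.items():
--         if tag_name == "6xHis":
--             continue
--         if "seq" in info:
--             if info["seq"] in aa:
--                 return True, tag_name, len(info["seq"])
--         if "prefix" in info:
--             if aa[:len(info["prefix"])] == info["prefix"]:
--                 return True, tag_name, len(info["prefix"])
--
--     return False, "", 0
-- ===== SOURCE B (Python) =====
-- CODON_TABLE = {
--     "UUU": "F", "UUC": "F", "UUA": "L", "UUG": "L",
--     "CUU": "L", "CUC": "L", "CUA": "L", "CUG": "L",
--     "AUU": "I", "AUC": "I", "AUA": "I", "AUG": "M",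
--     "GUU": "V", "GUC": "V", "GUA": "V", "GUG": "V",
--     "UCU": "S", "UCC": "S", "UCA": "S", "UCG": "S",
--     "CCU": "P", "CCC": "P", "CCA": "P", "CCG": "P",
--     "ACU": "T", "ACC": "T", "ACA": "T", "ACG": "T",
--     "GCU": "A", "GCC": "A", "GCA": "A", "GCG": "A",
--     "UAU": "Y", "UAC": "Y", "UAA": "*", "UAG": "*",
--     "CAU": "H", "CAC": "H", "CAA": "Q", "CAG": "Q",
--     "AAU": "N", "AAC": "N", "AAA": "K", "AAG": "K",
--     "GAU": "D", "GAC": "D", "GAA": "E", "GAG": "E",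
--     "UGU": "C", "UGC": "C", "UGA": "*", "UGG": "W",
--     "CGU": "R", "CGC": "R", "CGA": "R", "CGG": "R",
--     "AGU": "S", "AGC": "S", "AGA": "R", "AGG": "R",
--     "GGU": "G", "GGC": "G", "GGA": "G", "GGG": "G",
-- }
--
-- TAG_CHECKS = [
--     ("FLAG", "DYKDDDDK", False),
--     ("Strep-tag", "WSHPQFEK", False),
--     ("HA", "YPYDVPDYA", False),
--     ("Myc", "EQKLISEEDL", False),
--     ("MBP", "MKIEEGKLVI", True),
--     ("GST", "MSPILGYWKI", True),
-- ]
--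
-- def screen_tags(cds_rna: str) -> tuple[bool, str, int]:
--     """Check first 30 codons for known tags."""
--     window = cds_rna[:90]
--     codons = [window[i:i + 3] for i in range(0, len(window) - 2, 3)]
--
--     # 6xHis: render the His codons as an 'H'/'.' marker string and probe it
--     # with growing all-H blocks; the longest block found is the max run.
--     marker = "".join("H" if c in ("CAC", "CAU") else "." for c in codons)
--     max_his = max(k for k in range(len(marker) + 1) if "H" * k in marker)
--     if max_his >= 4:
--         return True, "6xHis", max_his
--
--     # Translate every codon, then cut the protein at the first stop.
--     full = "".join(CODON_TABLE.get(c, "X") for c in codons)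
--     stop = full.find("*")
--     aa = full if stop == -1 else full[:stop]
--
--     for name, pattern, is_prefix in TAG_CHECKS:
--         if aa.startswith(pattern) if is_prefix else pattern in aa:
--             return True, name, len(pattern)
--     return False, "", 0
-- ===== Notes on version B (the rewrite author's own statement) =====
-- stated objective: alternative
-- what changed: B discards A's stateful scans (running His counter with max-update, translate loop with break) for declarative string probing: it renders the codons as a His marker string and takes the largest k such that a block of k marker characters is a substring, translates every codon and cuts the protein at the first stop via str.find, and drives the tag tests from one flat (name, pattern, is_prefix) rule table.
import Mathlib
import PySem

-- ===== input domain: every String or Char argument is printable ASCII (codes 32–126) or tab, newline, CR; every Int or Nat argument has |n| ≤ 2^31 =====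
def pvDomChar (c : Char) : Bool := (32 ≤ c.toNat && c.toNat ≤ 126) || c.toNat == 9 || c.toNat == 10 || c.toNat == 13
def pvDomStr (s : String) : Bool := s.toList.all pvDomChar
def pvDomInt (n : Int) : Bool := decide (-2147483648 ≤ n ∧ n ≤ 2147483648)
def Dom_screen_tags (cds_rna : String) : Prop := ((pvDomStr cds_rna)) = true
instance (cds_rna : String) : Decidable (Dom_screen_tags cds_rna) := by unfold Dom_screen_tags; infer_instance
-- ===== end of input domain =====

-- B replaces A's stateful loops (run counter with max, translate-with-break) by declarative
-- string probing: a His marker string probed with growing all-H substring blocks, translate-all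
-- then cut at the first stop via find, and one flat (name, pattern, is_prefix) rule table.

-- ===== PORT A =====
def CODON_TABLE : PySem.Dict String String := PySem.Dict.ofList [
  ("UUU", "F"), ("UUC", "F"), ("UUA", "L"), ("UUG", "L"),
  ("CUU", "L"), ("CUC", "L"), ("CUA", "L"), ("CUG", "L"),
  ("AUU", "I"), ("AUC", "I"), ("AUA", "I"), ("AUG", "M"),
  ("GUU", "V"), ("GUC", "V"), ("GUA", "V"), ("GUG", "V"),
  ("UCU", "S"), ("UCC", "S"), ("UCA", "S"), ("UCG", "S"),
  ("CCU", "P"), ("CCC", "P"), ("CCA", "P"), ("CCG", "P"),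
  ("ACU", "T"), ("ACC", "T"), ("ACA", "T"), ("ACG", "T"),
  ("GCU", "A"), ("GCC", "A"), ("GCA", "A"), ("GCG", "A"),
  ("UAU", "Y"), ("UAC", "Y"), ("UAA", "*"), ("UAG", "*"),
  ("CAU", "H"), ("CAC", "H"), ("CAA", "Q"), ("CAG", "Q"),
  ("AAU", "N"), ("AAC", "N"), ("AAA", "K"), ("AAG", "K"),
  ("GAU", "D"), ("GAC", "D"), ("GAA", "E"), ("GAG", "E"),
  ("UGU", "C"), ("UGC", "C"), ("UGA", "*"), ("UGG", "W"),
  ("CGU", "R"), ("CGC", "R"), ("CGA", "R"), ("CGG", "R"),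
  ("AGU", "S"), ("AGC", "S"), ("AGA", "R"), ("AGG", "R"),
  ("GGU", "G"), ("GGC", "G"), ("GGA", "G"), ("GGG", "G")]

-- TAG_SIGNATURES: dict of dicts; "type"/"seq"/"prefix" keys all carry string values
def TAG_SIGNATURES : PySem.Dict String (PySem.Dict String String) := PySem.Dict.ofList [
  ("6xHis", PySem.Dict.ofList [("type", "codon_pattern")]),
  ("FLAG", PySem.Dict.ofList [("seq", "DYKDDDDK")]),
  ("Strep-tag", PySem.Dict.ofList [("seq", "WSHPQFEK")]),
  ("HA", PySem.Dict.ofList [("seq", "YPYDVPDYA")]),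
  ("Myc", PySem.Dict.ofList [("seq", "EQKLISEEDL")]),
  ("MBP", PySem.Dict.ofList [("prefix", "MKIEEGKLVI")]),
  ("GST", PySem.Dict.ofList [("prefix", "MSPILGYWKI")])]

-- the 'for i in range…' loop of translate_rna, with its break
def translateLoop (rna : String) : List Int → List String → List String
  | [], aa => aa
  | i :: rest, aa =>
    let codon := PySem.Str.slice rna (some i) (some (i + 3))
    let residue := CODON_TABLE.getD codon "X"
    if residue = "*" then aa
    else translateLoop rna rest (aa ++ [residue])

def translate_rna (rna : String) : String :=
  PySem.Str.join "" (translateLoop rna (PySem.List.pyRange 0 (PySem.Str.len rna - 2) 3) [])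

-- the 'for tag_name, info in TAG_SIGNATURES.items()' loop, with its early returns
def tagLoop (aa : String) : List (String × PySem.Dict String String) → Option (Bool × String × Int)
  | [] => none
  | (tag_name, info) :: rest =>
    if tag_name = "6xHis" then tagLoop aa rest
    else if info.contains "seq" && PySem.Str.isIn ((info.get? "seq").getD "") aa then
      some (true, tag_name, PySem.Str.len ((info.get? "seq").getD ""))
    else if info.contains "prefix" &&
        (PySem.Str.slice aa none (some (PySem.Str.len ((info.get? "prefix").getD ""))) ==
          (info.get? "prefix").getD "") then
      some (true, tag_name, PySem.Str.len ((info.get? "prefix").getD ""))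
    else tagLoop aa rest

def screen_tags (cds_rna : String) : Bool × String × Int :=
  let first_90nt := PySem.Str.slice cds_rna none (some 90)
  let aa := translate_rna first_90nt
  let his := (PySem.List.pyRange 0 (min (PySem.Str.len cds_rna) 90 - 2) 3).foldl
    (fun (st : Int × Int) i =>
      let codon := PySem.Str.slice cds_rna (some i) (some (i + 3))
      if codon = "CAC" ∨ codon = "CAU" then (st.1 + 1, max st.2 (st.1 + 1))
      else (0, st.2)) (0, 0)
  if his.2 ≥ 4 then (true, "6xHis", his.2)
  else (tagLoop aa TAG_SIGNATURES.items).getD (false, "", 0)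

-- ===== PORT B =====
def TAG_CHECKS : List (String × String × Bool) :=
  [("FLAG", "DYKDDDDK", false), ("Strep-tag", "WSHPQFEK", false),
   ("HA", "YPYDVPDYA", false), ("Myc", "EQKLISEEDL", false),
   ("MBP", "MKIEEGKLVI", true), ("GST", "MSPILGYWKI", true)]

-- Source B's 'for name, pattern, is_prefix in TAG_CHECKS' loop with its early returns
def tagChecks (aa : String) : List (String × String × Bool) → Bool × String × Int
  | [] => (false, "", 0)
  | (name, pat, isPre) :: rest =>
    if (if isPre then PySem.Str.startswith aa pat else PySem.Str.isIn pat aa) then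
      (true, name, PySem.Str.len pat)
    else tagChecks aa rest

def screen_tags_alt (cds_rna : String) : Bool × String × Int :=
  let window := PySem.Str.slice cds_rna none (some 90)
  let codons := (PySem.List.pyRange 0 (PySem.Str.len window - 2) 3).map
    (fun i => PySem.Str.slice window (some i) (some (i + 3)))
  let marker := PySem.Str.join "" (codons.map (fun c => if c = "CAC" ∨ c = "CAU" then "H" else "."))
  -- max(k for k in range(len(marker)+1) if "H"*k in marker); the generator is never
  -- empty (k = 0 always qualifies), so Python's max never raises: .getD 0 is never used
  let max_his := (PySem.List.max? ((PySem.List.pyRange 0 (PySem.Str.len marker + 1) 1).filter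
      (fun k => PySem.Str.isIn (String.ofList (PySem.List.pyRepeat ['H'] k)) marker))
      (fun x => x)).getD 0
  if max_his ≥ 4 then (true, "6xHis", max_his)
  else
    let full := PySem.Str.join "" (codons.map (fun c => CODON_TABLE.getD c "X"))
    let stop := PySem.Str.find full "*"
    let aa := if stop = -1 then full else PySem.Str.slice full none (some stop)
    tagChecks aa TAG_CHECKS

-- ===== PRECONDITION & SPEC =====
def Spec_screen_tags (cds_rna : String) (out : Bool × String × Int) : Prop := out = screen_tags_alt cds_rna
instance (cds_rna : String) (out : Bool × String × Int) : Decidable (Spec_screen_tags cds_rna out) := by unfold Spec_screen_tags; infer_instance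

-- ===== CLAIM (what is proved, stated in full; the proofs are below) =====
def Claim_equal_screen_tags : Prop := ∀ (cds_rna : String), Dom_screen_tags cds_rna → Spec_screen_tags cds_rna (screen_tags cds_rna)

-- ===== LEMMAS AND PROOFS =====

theorem string_toList_inj {s t : String} (h : s.toList = t.toList) : s = t :=
  String.toList_inj.mp h

-- leading run of `true`s
def Lrun : List Bool → Int
  | [] => 0
  | b :: cs => if b then Lrun cs + 1 else 0

-- maximum run of `true`s (max of Lrun over all suffixes)
def Nrun : List Bool → Int
  | [] => 0
  | b :: cs => max (Lrun (b :: cs)) (Nrun cs)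

theorem Lrun_nonneg (cs : List Bool) : 0 ≤ Lrun cs := by
  induction cs with
  | nil => simp [Lrun]
  | cons b cs ih => simp only [Lrun]; split <;> omega

theorem Nrun_nonneg (cs : List Bool) : 0 ≤ Nrun cs := by
  cases cs with
  | nil => simp [Nrun]
  | cons b cs => simp only [Nrun]; have := Lrun_nonneg (b :: cs); omega

theorem Lrun_le_Nrun (cs : List Bool) : Lrun cs ≤ Nrun cs := by
  cases cs with
  | nil => simp [Lrun, Nrun]
  | cons b cs => simp only [Nrun]; omega

theorem Lrun_le_length (cs : List Bool) : Lrun cs ≤ cs.length := by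
  induction cs with
  | nil => simp [Lrun]
  | cons b cs ih => simp only [Lrun, List.length_cons]; split <;> omega

theorem Nrun_le_length (cs : List Bool) : Nrun cs ≤ cs.length := by
  induction cs with
  | nil => simp [Nrun]
  | cons b cs ih =>
    simp only [Nrun, List.length_cons]
    have := Lrun_le_length (b :: cs)
    simp only [List.length_cons] at this
    omega

-- A's His loop over the flag list: the best field computes Nrun
def aStep (st : Int × Int) (b : Bool) : Int × Int :=
  if b then (st.1 + 1, max st.2 (st.1 + 1)) else (0, st.2)

theorem foldl_aStep (cs : List Bool) (r bst : Int) (h0 : 0 ≤ r) (h1 : r ≤ bst) :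
    (cs.foldl aStep (r, bst)).2 = max bst (max (r + Lrun cs) (Nrun cs)) := by
  induction cs generalizing r bst with
  | nil => simp [Lrun, Nrun]; omega
  | cons b cs ih =>
    cases b with
    | true =>
      rw [List.foldl_cons]
      have : aStep (r, bst) true = (r + 1, max bst (r + 1)) := rfl
      rw [this, ih (r+1) _ (by omega) (by omega)]
      simp only [Lrun, Nrun, if_true]
      have := Lrun_nonneg cs; have := Nrun_nonneg cs; have := Lrun_le_Nrun cs
      omega
    | false =>
      rw [List.foldl_cons]
      have : aStep (r, bst) false = (0, bst) := rfl
      rw [this, ih 0 _ (by omega) (by omega)]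
      simp only [Lrun, Nrun, Bool.false_eq_true, if_false]
      have := Lrun_nonneg cs; have := Nrun_nonneg cs; have := Lrun_le_Nrun cs
      omega

-- marker characters of a flag list
def markerChars (cs : List Bool) : List Char := cs.map (fun b => if b then 'H' else '.')

theorem rep_prefix (k : Nat) (cs : List Bool) :
    List.replicate k 'H' <+: markerChars cs ↔ (k : Int) ≤ Lrun cs := by
  induction cs generalizing k with
  | nil =>
    simp only [markerChars, List.map_nil, List.prefix_nil, Lrun]
    constructor
    · intro h; have := List.eq_nil_iff_length_eq_zero.mp h; simp at this; omega
    · intro h; have : k = 0 := by omega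
      simp [this]
  | cons b cs ih =>
    cases k with
    | zero =>
      simp only [List.replicate_zero, List.nil_prefix, Nat.cast_zero, true_iff]
      exact Lrun_nonneg _
    | succ k =>
      simp only [List.replicate_succ, markerChars, List.map_cons, List.cons_prefix_cons]
      cases b with
      | true =>
        simp only [if_true, Lrun]
        constructor
        · rintro ⟨-, h⟩; have := (ih k).mp h; push_cast; push_cast at this; omega
        · intro h
          refine ⟨by simp, (ih k).mpr ?_⟩
          push_cast at h; omega
      | false =>
        simp only [Bool.false_eq_true, if_false, Lrun]
        constructor
        · rintro ⟨h, -⟩; exact absurd h (by decide)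
        · intro h; exfalso; push_cast at h; omega

theorem rep_infix (k : Nat) (cs : List Bool) :
    List.replicate k 'H' <:+: markerChars cs ↔ (k : Int) ≤ Nrun cs := by
  induction cs with
  | nil =>
    simp only [markerChars, List.map_nil, List.infix_nil, Nrun]
    constructor
    · intro h; have := List.eq_nil_iff_length_eq_zero.mp h; simp at this; omega
    · intro h; have : k = 0 := by omega
      simp [this]
  | cons b cs ih =>
    have hcons : markerChars (b :: cs) = (if b then 'H' else '.') :: markerChars cs := rfl
    rw [hcons, List.infix_cons_iff, ← hcons]
    rw [show (List.replicate k 'H' <+: markerChars (b :: cs)) ↔ ((k:Int) ≤ Lrun (b::cs)) from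
      rep_prefix k (b::cs), ih]
    simp only [Nrun]
    omega

-- length of cds_rna[:90]
theorem len_first90 (cds_rna : String) :
    PySem.Str.len (PySem.Str.slice cds_rna none (some 90)) = min (PySem.Str.len cds_rna) 90 := by
  have h90 : (90 : Int) = ((90 : Nat) : Int) := by norm_num
  rw [PySem.Str.len_eq, PySem.Str.len_eq, PySem.Str.toList_slice,
      PySem.Chars.slice_eq_listSlice, h90, PySem.List.slice_to_natCast]
  simp [List.length_take]
  omega

-- in-range slices of cds_rna[:90] agree with slices of cds_rna
theorem slice_first90 (cds_rna : String) (i : Int) (h0 : 0 ≤ i) (h3 : i + 3 ≤ 90) :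
    PySem.Str.slice (PySem.Str.slice cds_rna none (some 90)) (some i) (some (i + 3))
      = PySem.Str.slice cds_rna (some i) (some (i + 3)) := by
  apply string_toList_inj
  have h90 : (90 : Int) = ((90 : Nat) : Int) := by norm_num
  rw [PySem.Str.toList_slice, PySem.Str.toList_slice, PySem.Chars.slice_eq_listSlice,
      PySem.Chars.slice_eq_listSlice, PySem.Str.toList_slice, PySem.Chars.slice_eq_listSlice,
      h90, PySem.List.slice_to_natCast,
      PySem.List.slice_toNat _ h0 (by omega : (0:Int) ≤ i + 3),
      PySem.List.slice_toNat _ h0 (by omega : (0:Int) ≤ i + 3)]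
  have hK : (i + 3).toNat - i.toNat = 3 := by omega
  rw [hK, List.drop_take, List.take_take]
  congr 1
  omega

-- A's prefix test aa[:len(p)] == p is startswith
theorem slice_eq_startswith (aa p : String) :
    (PySem.Str.slice aa none (some (PySem.Str.len p)) == p) = PySem.Str.startswith aa p := by
  rw [Bool.eq_iff_iff, beq_iff_eq, PySem.Str.startswith_eq, PySem.Chars.startswith_iff]
  constructor
  · intro h
    rw [← h, PySem.Str.toList_slice, PySem.Chars.slice_eq_listSlice, PySem.Str.len_eq,
        PySem.List.slice_to_natCast]
    exact List.take_prefix _ _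
  · intro h
    apply string_toList_inj
    rw [PySem.Str.toList_slice, PySem.Chars.slice_eq_listSlice, PySem.Str.len_eq,
        PySem.List.slice_to_natCast]
    exact (List.prefix_iff_eq_take.mp h).symm

-- the tag-dict walk equals B's flat rule-table loop
theorem tagLoop_skip (aa : String) (info : PySem.Dict String String)
    (rest : List (String × PySem.Dict String String)) :
    tagLoop aa (("6xHis", info) :: rest) = tagLoop aa rest := by
  simp only [tagLoop, if_true]

theorem tagLoop_seq (aa name p : String) (rest : List (String × PySem.Dict String String))
    (h : ¬ name = "6xHis") :
    tagLoop aa ((name, PySem.Dict.ofList [("seq", p)]) :: rest)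
      = if PySem.Str.isIn p aa then some (true, name, PySem.Str.len p) else tagLoop aa rest := by
  have c1 : (PySem.Dict.ofList [("seq", p)] : PySem.Dict String String).contains "seq" = true := rfl
  have c2 : (PySem.Dict.ofList [("seq", p)] : PySem.Dict String String).contains "prefix" = false := rfl
  have g1 : ((PySem.Dict.ofList [("seq", p)] : PySem.Dict String String).get? "seq").getD "" = p := rfl
  simp only [tagLoop, c1, c2, g1, Bool.true_and, Bool.false_and, if_neg h, if_false,
    Bool.false_eq_true]

theorem tagLoop_prefix (aa name p : String) (rest : List (String × PySem.Dict String String))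
    (h : ¬ name = "6xHis") :
    tagLoop aa ((name, PySem.Dict.ofList [("prefix", p)]) :: rest)
      = if PySem.Str.startswith aa p then some (true, name, PySem.Str.len p)
        else tagLoop aa rest := by
  have c1 : (PySem.Dict.ofList [("prefix", p)] : PySem.Dict String String).contains "seq" = false := rfl
  have c2 : (PySem.Dict.ofList [("prefix", p)] : PySem.Dict String String).contains "prefix" = true := rfl
  have g1 : ((PySem.Dict.ofList [("prefix", p)] : PySem.Dict String String).get? "prefix").getD "" = p := rfl
  simp only [tagLoop, c1, c2, g1, Bool.true_and, Bool.false_and, if_neg h, if_false,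
    Bool.false_eq_true, slice_eq_startswith]

theorem tag_eq (aa : String) :
    (tagLoop aa TAG_SIGNATURES.items).getD (false, "", 0) = tagChecks aa TAG_CHECKS := by
  have hitems : TAG_SIGNATURES.items =
      [("6xHis", PySem.Dict.ofList [("type", "codon_pattern")]),
       ("FLAG", PySem.Dict.ofList [("seq", "DYKDDDDK")]),
       ("Strep-tag", PySem.Dict.ofList [("seq", "WSHPQFEK")]),
       ("HA", PySem.Dict.ofList [("seq", "YPYDVPDYA")]),
       ("Myc", PySem.Dict.ofList [("seq", "EQKLISEEDL")]),
       ("MBP", PySem.Dict.ofList [("prefix", "MKIEEGKLVI")]),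
       ("GST", PySem.Dict.ofList [("prefix", "MSPILGYWKI")])] := rfl
  rw [hitems, tagLoop_skip,
    tagLoop_seq aa "FLAG" _ _ (by decide), tagLoop_seq aa "Strep-tag" _ _ (by decide),
    tagLoop_seq aa "HA" _ _ (by decide), tagLoop_seq aa "Myc" _ _ (by decide),
    tagLoop_prefix aa "MBP" _ _ (by decide), tagLoop_prefix aa "GST" _ _ (by decide)]
  simp only [tagChecks, TAG_CHECKS]
  split_ifs <;> simp_all [tagLoop]

-- the codon list of cds_rna[:90] and its His flags
def codonsOf (cds : String) : List String :=
  (PySem.List.pyRange 0 (PySem.Str.len (PySem.Str.slice cds none (some 90)) - 2) 3).map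
    (fun i => PySem.Str.slice (PySem.Str.slice cds none (some 90)) (some i) (some (i + 3)))

def flagsOf (cds : String) : List Bool :=
  (codonsOf cds).map (fun c => decide (c = "CAC" ∨ c = "CAU"))

-- A's His loop over raw indices computes Nrun of the flags
theorem his_eq (cds : String) :
    ((PySem.List.pyRange 0 (min (PySem.Str.len cds) 90 - 2) 3).foldl
      (fun (st : Int × Int) i =>
        if PySem.Str.slice cds (some i) (some (i + 3)) = "CAC" ∨
           PySem.Str.slice cds (some i) (some (i + 3)) = "CAU" then (st.1 + 1, max st.2 (st.1 + 1))
        else (0, st.2)) (0, 0)).2 = Nrun (flagsOf cds) := by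
  have hflag : flagsOf cds = (PySem.List.pyRange 0 (min (PySem.Str.len cds) 90 - 2) 3).map
      (fun i => decide (PySem.Str.slice cds (some i) (some (i+3)) = "CAC" ∨
                        PySem.Str.slice cds (some i) (some (i+3)) = "CAU")) := by
    unfold flagsOf codonsOf
    rw [len_first90, List.map_map]
    apply List.map_congr_left
    intro i hi
    have hmem := (PySem.List.mem_pyRange_iff_of_pos (by norm_num : (0:Int) < 3) i).mp hi
    have h0 : 0 ≤ i := by omega
    have h3 : i + 3 ≤ 90 := by omega
    simp [Function.comp, slice_first90 cds i h0 h3]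
  have hfold : ((PySem.List.pyRange 0 (min (PySem.Str.len cds) 90 - 2) 3).foldl
      (fun (st : Int × Int) i =>
        if PySem.Str.slice cds (some i) (some (i + 3)) = "CAC" ∨
           PySem.Str.slice cds (some i) (some (i + 3)) = "CAU" then (st.1 + 1, max st.2 (st.1 + 1))
        else (0, st.2)) (0, 0)) = (flagsOf cds).foldl aStep (0, 0) := by
    rw [hflag, List.foldl_map]
    apply PySem.List.foldl_congr_mem
    intro acc i hi
    by_cases h : (PySem.Str.slice cds (some i) (some (i+3)) = "CAC" ∨
                  PySem.Str.slice cds (some i) (some (i+3)) = "CAU") <;> simp [aStep, h]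
  rw [hfold, foldl_aStep _ 0 0 le_rfl le_rfl]
  have := Lrun_nonneg (flagsOf cds); have := Lrun_le_Nrun (flagsOf cds)
  have := Nrun_nonneg (flagsOf cds)
  omega

-- B's marker string spells out the flags
theorem marker_toList (cds : String) :
    (PySem.Str.join "" ((codonsOf cds).map
        (fun c => if c = "CAC" ∨ c = "CAU" then "H" else "."))).toList
      = markerChars (flagsOf cds) := by
  rw [PySem.Str.toList_join]
  have h : (((codonsOf cds).map (fun c => if c = "CAC" ∨ c = "CAU" then "H" else ".")).map
        String.toList) = (markerChars (flagsOf cds)).map (fun ch => [ch]) := by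
    unfold markerChars flagsOf
    simp only [List.map_map]
    apply List.map_congr_left
    intro c _
    by_cases h : (c = "CAC" ∨ c = "CAU") <;> simp [Function.comp, h]
  rw [h]
  simpa using PySem.Chars.join_nil_singletons (markerChars (flagsOf cds))

-- B's block-probing maximum is Nrun
theorem maxhis_eq (cds : String) (marker : String)
    (hm : marker.toList = markerChars (flagsOf cds)) :
    (PySem.List.max? ((PySem.List.pyRange 0 (PySem.Str.len marker + 1) 1).filter
      (fun k => PySem.Str.isIn (String.ofList (PySem.List.pyRepeat ['H'] k)) marker))
      (fun x => x)).getD 0 = Nrun (flagsOf cds) := by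
  have hN0 : 0 ≤ Nrun (flagsOf cds) := Nrun_nonneg _
  have hNlen : Nrun (flagsOf cds) ≤ PySem.Str.len marker := by
    rw [PySem.Str.len_eq, hm]
    unfold markerChars
    rw [List.length_map]
    exact Nrun_le_length _
  have hmemiff : ∀ k : Int,
      (k ∈ (PySem.List.pyRange 0 (PySem.Str.len marker + 1) 1).filter
        (fun k => PySem.Str.isIn (String.ofList (PySem.List.pyRepeat ['H'] k)) marker))
      ↔ (0 ≤ k ∧ k < PySem.Str.len marker + 1 ∧ k ≤ Nrun (flagsOf cds)) := by
    intro k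
    rw [List.mem_filter, PySem.List.mem_pyRange_one]
    constructor
    · rintro ⟨⟨hk0, hk1⟩, hin⟩
      refine ⟨hk0, hk1, ?_⟩
      rw [PySem.Str.isIn_iff_infix] at hin
      rw [PySem.List.pyRepeat_singleton] at hin
      have : (String.ofList (List.replicate k.toNat 'H')).toList = List.replicate k.toNat 'H' := by
        simp
      rw [this, hm] at hin
      have := (rep_infix k.toNat (flagsOf cds)).mp hin
      omega
    · rintro ⟨hk0, hk1, hkN⟩
      refine ⟨⟨hk0, hk1⟩, ?_⟩
      rw [PySem.Str.isIn_iff_infix, PySem.List.pyRepeat_singleton]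
      have : (String.ofList (List.replicate k.toNat 'H')).toList = List.replicate k.toNat 'H' := by
        simp
      rw [this, hm]
      exact (rep_infix k.toNat (flagsOf cds)).mpr (by omega)
  obtain ⟨m, hmax⟩ : ∃ m, PySem.List.max? ((PySem.List.pyRange 0 (PySem.Str.len marker + 1) 1).filter
      (fun k => PySem.Str.isIn (String.ofList (PySem.List.pyRepeat ['H'] k)) marker))
      (fun x => x) = some m := by
    cases h : PySem.List.max? ((PySem.List.pyRange 0 (PySem.Str.len marker + 1) 1).filter
        (fun k => PySem.Str.isIn (String.ofList (PySem.List.pyRepeat ['H'] k)) marker))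
        (fun x => x) with
    | none =>
      exfalso
      have hnil := (PySem.List.max?_eq_none_iff _ _).mp h
      have hNmem := (hmemiff (Nrun (flagsOf cds))).mpr ⟨hN0, by omega, le_rfl⟩
      rw [hnil] at hNmem
      simp at hNmem
    | some m => exact ⟨m, rfl⟩
  rw [hmax, Option.getD_some]
  have h1 := PySem.List.max?_isMax hmax (Nrun (flagsOf cds))
    ((hmemiff (Nrun (flagsOf cds))).mpr ⟨hN0, by omega, le_rfl⟩)
  have h2 := (hmemiff m).mp (PySem.List.max?_mem hmax)
  simp only at h1
  omega

-- the break-style translate loop keeps residues up to the first stop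
def tstar : List String → List String
  | [] => []
  | r :: rs => if r = "*" then [] else r :: tstar rs

theorem translateLoop_eq (rna : String) (is : List Int) (acc : List String) :
    translateLoop rna is acc
      = acc ++ tstar (is.map (fun i =>
          CODON_TABLE.getD (PySem.Str.slice rna (some i) (some (i+3))) "X")) := by
  induction is generalizing acc with
  | nil => simp [translateLoop, tstar]
  | cons i is ih =>
    simp only [translateLoop, List.map_cons, tstar]
    split_ifs with h
    · simp
    · rw [ih]; simp

theorem mem_tstar {r : String} {rs : List String} (h : r ∈ tstar rs) : r ∈ rs := by
  induction rs with
  | nil => simp [tstar] at h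
  | cons a rs ih =>
    simp only [tstar] at h
    split_ifs at h with ha
    · simp at h
    · rcases List.mem_cons.mp h with h | h
      · simp [h]
      · exact List.mem_cons_of_mem _ (ih h)

-- every residue the codon table (or the default) yields is a single character
def hd1 (r : String) : Char := r.toList.headD 'X'

set_option maxRecDepth 8192 in
theorem resd_sing (c : String) : (CODON_TABLE.getD c "X").toList = [hd1 (CODON_TABLE.getD c "X")] := by
  rw [PySem.Dict.getD_eq_get?_getD]
  cases h : CODON_TABLE.get? c with
  | none => rfl
  | some v =>
    have hv : (c, v) ∈ CODON_TABLE.items := PySem.Dict.mem_items_of_get?_eq_some _ h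
    simp only [Option.getD_some]
    have hall : ∀ p ∈ CODON_TABLE.items, (p.2.toList.length = 1) := by decide
    obtain ⟨a, ha⟩ := List.length_eq_one_iff.mp (hall _ hv)
    rw [ha]; simp [hd1, ha]

theorem join_sing (rs : List String) (hs : ∀ r ∈ rs, r.toList = [hd1 r]) :
    (PySem.Str.join "" rs).toList = rs.map hd1 := by
  rw [PySem.Str.toList_join]
  have h : rs.map String.toList = (rs.map hd1).map (fun c => [c]) := by
    rw [List.map_map]
    exact List.map_congr_left (fun r hr => by rw [hs r hr]; rfl)
  rw [h]
  simpa using PySem.Chars.join_nil_singletons (rs.map hd1)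

theorem map_hd1_tstar (rs : List String) (hs : ∀ r ∈ rs, r.toList = [hd1 r]) :
    (tstar rs).map hd1 = (rs.map hd1).takeWhile (· ≠ '*') := by
  induction rs with
  | nil => rfl
  | cons r rs ih =>
    have hr := hs r (by simp)
    have hstar : (r = "*") ↔ (hd1 r = '*') := by
      constructor
      · intro h; subst h; rfl
      · intro h; apply string_toList_inj; rw [hr, h]; rfl
    by_cases h : r = "*"
    · have h2 : hd1 r = '*' := hstar.mp h
      subst h
      simp [tstar, show hd1 "*" = '*' from rfl]
    · have h2 : ¬ hd1 r = '*' := fun hh => h (hstar.mpr hh)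
      simp [tstar, h, h2, ih (fun r' hr' => hs r' (List.mem_cons_of_mem _ hr'))]

theorem take_eq_takeWhile (cs : List Char) (n : Nat) (hn : cs[n]? = some '*')
    (hmin : ∀ i, i < n → cs[i]? ≠ some '*') : cs.take n = cs.takeWhile (· ≠ '*') := by
  induction cs generalizing n with
  | nil => simp at hn
  | cons c cs ih =>
    cases n with
    | zero =>
      simp only [List.getElem?_cons_zero, Option.some.injEq] at hn
      simp [hn]
    | succ n =>
      have h0 := hmin 0 (by omega)
      simp only [List.getElem?_cons_zero, ne_eq, Option.some.injEq] at h0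
      simp only [List.take_succ_cons, List.takeWhile_cons]
      rw [if_pos (by simpa using h0)]
      rw [ih n (by simpa using hn) (fun i hi => by
        have := hmin (i+1) (by omega)
        simpa using this)]

-- find-then-cut equals takeWhile before the first stop character
theorem find_star (cs : List Char) :
    (if PySem.Chars.find cs ['*'] = -1 then cs else cs.take (PySem.Chars.find cs ['*']).toNat)
      = cs.takeWhile (· ≠ '*') := by
  have hsp : ∀ (l : List Char), ['*'] <+: l ↔ l.head? = some '*' := by
    intro l; cases l with
    | nil => simp
    | cons b t => simp [List.cons_prefix_cons, eq_comm]
  split_ifs with h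
  · have h1 : ¬ ['*'] <:+: cs := (PySem.Chars.find_eq_neg_one_iff _ _).mp h
    have h2 : '*' ∉ cs := fun hmem => h1 ((List.singleton_infix_iff _ _).mpr hmem)
    symm
    rw [List.takeWhile_eq_self_iff]
    intro x hx
    simp only [ne_eq, decide_eq_true_eq]
    intro hxx
    exact h2 (by rw [← hxx]; exact hx)
  · have hpos : 0 ≤ PySem.Chars.find cs ['*'] := by
      have := PySem.Chars.neg_one_le_find (s := cs) (sub := ['*'])
      omega
    obtain ⟨hpre, hmin⟩ := PySem.Chars.find_spec hpos
    have hn : cs[(PySem.Chars.find cs ['*']).toNat]? = some '*' := by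
      rw [← List.head?_drop]
      exact (hsp _).mp hpre
    have hm : ∀ i, i < (PySem.Chars.find cs ['*']).toNat → cs[i]? ≠ some '*' := by
      intro i hi hcontra
      exact hmin i hi ((hsp _).mpr (by rw [List.head?_drop]; exact hcontra))
    exact take_eq_takeWhile cs _ hn hm

-- A's translation of the window equals B's translate-all-then-cut
set_option maxHeartbeats 1000000 in
theorem aa_eq (cds : String) :
    translate_rna (PySem.Str.slice cds none (some 90))
      = (if PySem.Str.find (PySem.Str.join "" ((codonsOf cds).map
              (fun c => CODON_TABLE.getD c "X"))) "*" = -1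
         then PySem.Str.join "" ((codonsOf cds).map (fun c => CODON_TABLE.getD c "X"))
         else PySem.Str.slice (PySem.Str.join "" ((codonsOf cds).map
                (fun c => CODON_TABLE.getD c "X"))) none
                (some (PySem.Str.find (PySem.Str.join "" ((codonsOf cds).map
                  (fun c => CODON_TABLE.getD c "X"))) "*"))) := by
  have hsing : ∀ r ∈ (codonsOf cds).map (fun c => CODON_TABLE.getD c "X"), r.toList = [hd1 r] := by
    intro r hr
    obtain ⟨c, -, rfl⟩ := List.mem_map.mp hr
    exact resd_sing c
  have hA : translate_rna (PySem.Str.slice cds none (some 90))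
      = PySem.Str.join "" (tstar ((codonsOf cds).map (fun c => CODON_TABLE.getD c "X"))) := by
    unfold translate_rna
    rw [translateLoop_eq]
    simp only [List.nil_append]
    refine congrArg (PySem.Str.join "") (congrArg tstar ?_)
    unfold codonsOf
    rw [List.map_map]
    simp only [Function.comp_def]
  have hfull : (PySem.Str.join "" ((codonsOf cds).map (fun c => CODON_TABLE.getD c "X"))).toList
      = ((codonsOf cds).map (fun c => CODON_TABLE.getD c "X")).map hd1 := join_sing _ hsing
  have hfind : PySem.Str.find (PySem.Str.join "" ((codonsOf cds).map
        (fun c => CODON_TABLE.getD c "X"))) "*"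
      = PySem.Chars.find (((codonsOf cds).map (fun c => CODON_TABLE.getD c "X")).map hd1) ['*'] := by
    rw [PySem.Str.find_eq, hfull]
    rfl
  apply string_toList_inj
  rw [hA, join_sing _ (fun r hr => hsing r (mem_tstar hr)), map_hd1_tstar _ hsing]
  rw [← find_star (((codonsOf cds).map (fun c => CODON_TABLE.getD c "X")).map hd1)]
  by_cases hstop : PySem.Str.find (PySem.Str.join "" ((codonsOf cds).map
      (fun c => CODON_TABLE.getD c "X"))) "*" = -1
  · rw [if_pos hstop, if_pos (by rw [← hfind]; exact hstop), hfull]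
  · rw [if_neg hstop, if_neg (by rw [← hfind]; exact hstop)]
    have hpos : 0 ≤ PySem.Str.find (PySem.Str.join "" ((codonsOf cds).map
        (fun c => CODON_TABLE.getD c "X"))) "*" := by
      rw [hfind]
      have := PySem.Chars.neg_one_le_find
        (s := ((codonsOf cds).map (fun c => CODON_TABLE.getD c "X")).map hd1) (sub := ['*'])
      rw [hfind] at hstop
      omega
    rw [PySem.Str.toList_slice, PySem.Chars.slice_eq_listSlice, PySem.List.slice_to _ hpos, hfull,
      hfind]

-- ===== VERDICT (by name: the statement is the Claim_ definition above) =====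
set_option maxHeartbeats 1000000 in
theorem screen_tags_spec : Claim_equal_screen_tags := by
  intro cds _
  unfold Spec_screen_tags
  show screen_tags cds = screen_tags_alt cds
  simp only [screen_tags, screen_tags_alt]
  rw [show (List.map (fun i => PySem.Str.slice (PySem.Str.slice cds none (some 90)) (some i) (some (i + 3)))
        (PySem.List.pyRange 0 (PySem.Str.len (PySem.Str.slice cds none (some 90)) - 2) 3))
      = codonsOf cds from rfl]
  rw [his_eq, maxhis_eq cds _ (marker_toList cds), aa_eq]
  by_cases h4 : Nrun (flagsOf cds) ≥ 4
  · rw [if_pos h4, if_pos h4]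
  · rw [if_neg h4, if_neg h4, tag_eq]
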